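-- pv_equiv track=rewrite | github.com/noodles-sed/Simple-DSA | solutions/min_ops_make_zero.py | min_operations_to_zero
-- ===== SOURCE A (Python) =====
-- def min_operations_to_zero(nums):
--     n = len(nums)
--     if n == 0:
--         return 0
--
--     values = sorted({x for x in nums if x > 0})
--     ops = 0
--
--     for v in values:
--         i = 0
--         while i < n:
--             while i < n and nums[i] < v:
--                 i += 1
--             if i >= n:
--                 break
--
--             contains_v = False
--             while i < n and nums[i] >= v:
--                 if nums[i] == v:
--                     contains_v = True
--                 i += 1
--
--             if contains_v:
--                 ops += 1
--
--     return ops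
-- ===== SOURCE B (Python) =====
-- def min_operations_to_zero(nums):
--     # One O(n) pass: an index i is counted iff nums[i] > 0 and the nearest
--     # element to its left that is <= nums[i] is strictly smaller (or absent);
--     # a strictly increasing stack maintains exactly those candidates.
--     ops = 0
--     stack = []
--     for x in nums:
--         while stack and stack[-1] > x:
--             stack.pop()
--         if not stack or stack[-1] < x:
--             if x > 0:
--                 ops += 1
--             stack.append(x)
--     return ops
-- ===== Notes on version B (the rewrite author's own statement) =====
-- stated objective: faster
-- what changed: Replaced the per-distinct-value rescanning of the whole array (one run-chunking pass per positive value) by a single left-to-right monotonic-stack pass that counts an index exactly when the nearest left element <= nums[i] is strictly smaller or absent.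
import Mathlib
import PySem

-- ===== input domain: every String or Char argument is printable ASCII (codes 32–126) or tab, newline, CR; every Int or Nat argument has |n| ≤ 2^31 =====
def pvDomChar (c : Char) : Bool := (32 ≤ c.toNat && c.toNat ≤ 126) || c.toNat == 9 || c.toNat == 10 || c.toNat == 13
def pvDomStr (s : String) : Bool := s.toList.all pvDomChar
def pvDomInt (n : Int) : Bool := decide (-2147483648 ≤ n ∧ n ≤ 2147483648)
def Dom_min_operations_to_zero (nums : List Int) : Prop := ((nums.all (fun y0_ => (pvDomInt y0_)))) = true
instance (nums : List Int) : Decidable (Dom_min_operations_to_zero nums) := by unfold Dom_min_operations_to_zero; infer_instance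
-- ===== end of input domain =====

-- B replaces A's one-scan-per-distinct-positive-value counting by a single
-- monotonic-stack pass (asymptotically faster); the return value is proved equal.

-- ===== PORT A =====
-- A's inner 'while' machinery for one value v: skip elements < v, then scan a
-- run of elements >= v recording whether v occurs, add 1 per run containing v.
mutual
  def pvA_skip (v : Int) : List Int → Int
    | [] => 0
    | x :: t => if x < v then pvA_skip v t else pvA_run v (decide (x = v)) t
  def pvA_run (v : Int) (flag : Bool) : List Int → Int
    | [] => if flag then 1 else 0
    | x :: t => if x ≥ v then pvA_run v (flag || decide (x = v)) t
                else (if flag then 1 else 0) + pvA_skip v t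
end

def min_operations_to_zero (nums : List Int) : Int :=
  if nums.length = 0 then 0
  else
    -- values = sorted({x for x in nums if x > 0})
    let values := PySem.List.sorted (PySem.Set.ofList (nums.filter (fun x => decide (0 < x)))) (fun x => x) false
    values.foldl (fun ops v => ops + pvA_skip v nums) 0

-- ===== PORT B =====
-- 'while stack and stack[-1] > x: stack.pop()' (stack top = list head)
def pvB_pop (x : Int) : List Int → List Int
  | [] => []
  | s :: r => if s > x then pvB_pop x r else s :: r

def pvB_step (acc : Int × List Int) (x : Int) : Int × List Int :=
  let st := pvB_pop x acc.2
  if (match st with | [] => true | s :: _ => decide (s < x)) then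
    ((if 0 < x then acc.1 + 1 else acc.1), x :: st)
  else (acc.1, st)

def min_operations_to_zero_alt (nums : List Int) : Int :=
  (nums.foldl pvB_step ((0 : Int), ([] : List Int))).1

-- ===== PRECONDITION & SPEC =====
def Spec_min_operations_to_zero (nums : List Int) (out : Int) : Prop := out = min_operations_to_zero_alt nums
instance (nums : List Int) (out : Int) : Decidable (Spec_min_operations_to_zero nums out) := by unfold Spec_min_operations_to_zero; infer_instance

-- ===== CLAIM (what is proved, stated in full; the proofs are below) =====
def Claim_equal_min_operations_to_zero : Prop := ∀ (nums : List Int), Dom_min_operations_to_zero nums → Spec_min_operations_to_zero nums (min_operations_to_zero nums)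

-- ===== LEMMAS AND PROOFS =====

-- value of the nearest element of `pre` (to the left) that is ≤ x, if any
def pvNle (pre : List Int) (x : Int) : Option Int :=
  pre.reverse.find? (fun v => decide (v ≤ x))

-- the common spec: count positions whose nearest left element ≤ x is ≠ x, value positive
def pvC (pre : List Int) : List Int → Int
  | [] => 0
  | x :: t => (if 0 < x ∧ pvNle pre x ≠ some x then 1 else 0) + pvC (pre ++ [x]) t

-- per-value flag-fold form of A's run counting
def pvFC (v : Int) (seen : Bool) : List Int → Int
  | [] => 0
  | x :: t => if x < v then pvFC v false t
              else (if x = v ∧ seen = false then 1 else 0) + pvFC v (seen || decide (x = v)) t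

theorem pvNle_append (pre : List Int) (y x : Int) :
    pvNle (pre ++ [y]) x = if y ≤ x then some y else pvNle pre x := by
  simp [pvNle, List.reverse_append, List.find?]
  split_ifs with h <;> simp [h]

-- A's while machinery equals the flag fold
theorem pvA_eq_FC (l : List Int) :
    (∀ v, pvA_skip v l = pvFC v false l) ∧
    (∀ v flag, pvA_run v flag l = (if flag then 1 else 0) + pvFC v flag l) := by
  induction l with
  | nil => constructor <;> intros <;> simp [pvA_skip, pvA_run, pvFC]
  | cons x t ih =>
    constructor
    · intro v
      by_cases h : x < v
      · simp [pvA_skip, pvFC, h, ih.1 v]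
      · simp only [pvA_skip, pvFC, if_neg h, ih.2 v (decide (x = v))]
        by_cases hv : x = v <;> simp [hv]
    · intro v flag
      by_cases h : x ≥ v
      · have hnlt : ¬ x < v := not_lt.mpr h
        simp only [pvA_run, pvFC, if_pos h, if_neg hnlt, ih.2 v (flag || decide (x = v))]
        by_cases hv : x = v <;> cases flag <;> simp [hv]
      · have hlt : x < v := lt_of_not_ge h
        simp [pvA_run, pvFC, h, hlt, ih.1 v]

-- one step of the flag fold, with the seen state expressed through pvNle
theorem pvFC_step (v x : Int) (pre t : List Int) :
    pvFC v (decide (pvNle pre v = some v)) (x :: t) =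
      (if v = x then (if pvNle pre x ≠ some x then (1:Int) else 0) else 0) +
        pvFC v (decide (pvNle (pre ++ [x]) v = some v)) t := by
  rcases lt_trichotomy x v with h | h | h
  · have h1 : pvNle (pre ++ [x]) v = some x := by rw [pvNle_append]; simp [le_of_lt h]
    have h2 : (some x : Option Int) ≠ some v := by simp [ne_of_lt h]
    simp [pvFC, h, h1, h2, ne_of_gt h]
  · subst h
    have h1 : pvNle (pre ++ [x]) x = some x := by rw [pvNle_append]; simp
    by_cases hs : pvNle pre x = some x <;> simp [pvFC, hs, h1]
  · have h1 : pvNle (pre ++ [x]) v = pvNle pre v := by rw [pvNle_append]; simp [not_le.mpr h]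
    have hne : v ≠ x := ne_of_lt h
    simp [pvFC, not_lt.mpr (le_of_lt h), hne, Ne.symm hne, h1]

theorem sum_map_indicator (x : Int) (c : Int) (vs : List Int) (hnd : vs.Nodup) :
    (vs.map (fun v => if v = x then c else 0)).sum = if x ∈ vs then c else 0 := by
  induction vs with
  | nil => simp
  | cons a vs ih =>
    rcases List.nodup_cons.mp hnd with ⟨ha, hnd'⟩
    rw [List.map_cons, List.sum_cons, ih hnd']
    by_cases h : a = x
    · subst h; simp [ha]
    · simp [List.mem_cons, Ne.symm h, h]

theorem sum_map_add_int {α : Type} (f g : α → Int) (l : List α) :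
    (l.map (fun v => f v + g v)).sum = (l.map f).sum + (l.map g).sum := by
  induction l with
  | nil => simp
  | cons a l ih => simp [ih]; ring

-- sum of the per-value flag folds equals the common spec count
theorem sum_FC_eq_C (l : List Int) : ∀ (pre : List Int) (values : List Int),
    values.Nodup → (∀ v ∈ values, 0 < v) → (∀ x ∈ l, 0 < x → x ∈ values) →
    (values.map (fun v => pvFC v (decide (pvNle pre v = some v)) l)).sum = pvC pre l := by
  induction l with
  | nil => intro pre values _ _ _; simp [pvFC, pvC]
  | cons x t ih =>
    intro pre values hnd hpos hcov
    have hstep : (values.map (fun v => pvFC v (decide (pvNle pre v = some v)) (x :: t))).sum =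
        (values.map (fun v => if v = x then (if pvNle pre x ≠ some x then (1:Int) else 0) else 0)).sum +
        (values.map (fun v => pvFC v (decide (pvNle (pre ++ [x]) v = some v)) t)).sum := by
      rw [← sum_map_add_int]
      congr 1
      exact List.map_congr_left (fun v _ => pvFC_step v x pre t)
    rw [hstep, sum_map_indicator x _ values hnd,
        ih (pre ++ [x]) values hnd hpos (fun y hy => hcov y (List.mem_cons_of_mem _ hy))]
    have hmem : (x ∈ values) ↔ 0 < x := by
      constructor
      · exact fun h => hpos x h
      · exact fun h => hcov x (List.mem_cons_self) h
    show _ = pvC pre (x :: t)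
    simp only [pvC]
    by_cases hp : 0 < x
    · by_cases hn : pvNle pre x ≠ some x <;> simp [hmem.mpr hp, hn, hp]
    · have : x ∉ values := fun h => hp (hpos x h)
      simp [this, hp]

-- popping twice with a smaller bound is popping once
theorem pvB_pop_pop (y x : Int) (h : y < x) : ∀ st, pvB_pop y (pvB_pop x st) = pvB_pop y st := by
  intro st
  induction st with
  | nil => rfl
  | cons s r ih =>
    by_cases hs : s > x
    · simp [pvB_pop, hs, ih, gt_iff_lt, lt_trans h hs]
    · simp [pvB_pop, hs]

-- the stack invariant: popping with bound y exposes the nearest left element ≤ y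
def pvInv (pre st : List Int) : Prop := ∀ y, (pvB_pop y st).head? = pvNle pre y

theorem pvInv_push (pre st : List Int) (x : Int) (hI : pvInv pre st) :
    pvInv (pre ++ [x]) (x :: pvB_pop x st) := by
  intro y
  by_cases h : y < x
  · have : x > y := h
    simp only [pvB_pop, if_pos this]
    rw [pvB_pop_pop y x h st, hI y, pvNle_append, if_neg (not_le.mpr h)]
  · have : ¬ x > y := not_lt.mpr (not_lt.mp h)
    simp only [pvB_pop, if_neg this, List.head?_cons]
    rw [pvNle_append, if_pos (not_lt.mp h)]

theorem pvInv_nopush (pre st : List Int) (x : Int) (r : List Int)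
    (hI : pvInv pre st) (hd : pvB_pop x st = x :: r) :
    pvInv (pre ++ [x]) (pvB_pop x st) := by
  intro y
  by_cases h : y < x
  · rw [pvB_pop_pop y x h st, hI y, pvNle_append, if_neg (not_le.mpr h)]
  · rw [hd]
    have : ¬ x > y := not_lt.mpr (not_lt.mp h)
    simp only [pvB_pop, if_neg this, List.head?_cons]
    rw [pvNle_append, if_pos (not_lt.mp h)]

-- the head left after popping is ≤ the bound
theorem pvB_pop_head_le (x : Int) : ∀ (st : List Int) (s : Int) (r : List Int),
    pvB_pop x st = s :: r → s ≤ x := by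
  intro st
  induction st with
  | nil => intro s r h; simp [pvB_pop] at h
  | cons a t ih =>
    intro s r h
    by_cases ha : a > x
    · exact ih s r (by simpa [pvB_pop, ha] using h)
    · simp [pvB_pop, ha] at h
      omega

-- the B fold computes the common spec count, given the invariant
theorem foldB_eq_C (l : List Int) : ∀ (pre st : List Int) (ops : Int), pvInv pre st →
    (l.foldl pvB_step (ops, st)).1 = ops + pvC pre l := by
  induction l with
  | nil => intro pre st ops _; simp [pvC]
  | cons x t ih =>
    intro pre st ops hI
    have hd := hI x
    simp only [List.foldl_cons]
    rcases he : pvB_pop x st with _ | ⟨s, r⟩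
    · -- empty after popping: push and count iff 0 < x
      have hn : pvNle pre x = none := by rw [← hd, he]; rfl
      have hstep : pvB_step (ops, st) x = ((if 0 < x then ops + 1 else ops), x :: pvB_pop x st) := by
        simp [pvB_step, he]
      rw [hstep, ih (pre ++ [x]) _ _ (pvInv_push pre st x hI)]
      simp [pvC, hn]
      split_ifs <;> ring
    · have hs : pvNle pre x = some s := by rw [← hd, he]; rfl
      have hle : s ≤ x := pvB_pop_head_le x st s r he
      by_cases hlt : s < x
      · -- top < x: push and count iff 0 < x
        have hne : pvNle pre x ≠ some x := by rw [hs]; simp [ne_of_lt hlt]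
        have hstep : pvB_step (ops, st) x = ((if 0 < x then ops + 1 else ops), x :: pvB_pop x st) := by
          simp [pvB_step, he, hlt]
        rw [hstep, ih (pre ++ [x]) _ _ (pvInv_push pre st x hI)]
        simp [pvC, hne]
        split_ifs <;> ring
      · -- top = x: no push, no count
        have hxx : s = x := le_antisymm hle (not_lt.mp hlt)
        have hsx : pvNle pre x = some x := by rw [hs, hxx]
        have he' : pvB_pop x st = x :: r := by rw [he, hxx]
        have hstep : pvB_step (ops, st) x = (ops, pvB_pop x st) := by
          simp [pvB_step, he']
        rw [hstep, ih (pre ++ [x]) _ _ (pvInv_nopush pre st x r hI he')]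
        simp [pvC, hsx]

theorem alt_eq_C (nums : List Int) : min_operations_to_zero_alt nums = pvC [] nums := by
  have hI : pvInv [] [] := by intro y; rfl
  simpa [min_operations_to_zero_alt] using foldB_eq_C nums [] [] 0 hI

theorem a_eq_C (nums : List Int) : min_operations_to_zero nums = pvC [] nums := by
  by_cases hnil : nums.length = 0
  · rw [List.length_eq_zero_iff] at hnil
    subst hnil
    simp [min_operations_to_zero, pvC]
  · simp only [min_operations_to_zero, if_neg hnil]
    set values := PySem.List.sorted (PySem.Set.ofList (nums.filter (fun x => decide (0 < x)))) (fun x => x) false with hv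
    have hperm : values.Perm (PySem.Set.ofList (nums.filter (fun x => decide (0 < x)))) :=
      PySem.List.sorted_perm _ _ _
    have hnd : values.Nodup := hperm.symm.nodup (PySem.Set.nodup_ofList _)
    have hmemv : ∀ x : Int, x ∈ values ↔ (0 < x ∧ x ∈ nums) := by
      intro x
      rw [hperm.mem_iff, PySem.Set.mem_ofList, List.mem_filter]
      simp [and_comm]
    rw [PySem.List.foldl_add]
    have h1 : (values.map (fun v => pvA_skip v nums)) =
        (values.map (fun v => pvFC v (decide (pvNle [] v = some v)) nums)) := by
      apply List.map_congr_left
      intro v _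
      rw [(pvA_eq_FC nums).1 v]
      rfl
    rw [h1, sum_FC_eq_C nums [] values hnd
          (fun v hv' => ((hmemv v).mp hv').1)
          (fun x hx hpx => (hmemv x).mpr ⟨hpx, hx⟩)]
    ring

-- ===== VERDICT (by name: the statement is the Claim_ definition above) =====
theorem min_operations_to_zero_spec : Claim_equal_min_operations_to_zero := by
  intro nums _
  unfold Spec_min_operations_to_zero
  rw [a_eq_C, alt_eq_C]
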